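-- pv_equiv track=rewrite | github.com/kr8tiv-ai/Kin | runtime_types/support_chatbot.py | _generate_answer_from_article
-- ===== SOURCE A (Python) =====
-- def _generate_answer_from_article(
--
--     question: str,
--     article_content: str,
--     excerpt: str,
-- ) -> str:
--     """Generate answer text from article content.
--
--     Args:
--         question: User's question
--         article_content: Full article content
--         excerpt: Relevant excerpt
--
--     Returns:
--         Answer text
--     """
--     # Simple answer generation - use excerpt and add context
--     # In production, this could use an LLM for better synthesis
--
--     # Find the article title
--     lines = article_content.split('\n')
--     title = "this topic"
--     for line in lines:
--         if line.startswith('# '):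
--             title = line[2:].strip()
--             break
--
--     return f"Based on {title}: {excerpt}\n\nWould you like more details on this topic?"
-- ===== SOURCE B (Python) =====
-- def _generate_answer_from_article(
--     question: str,
--     article_content: str,
--     excerpt: str,
-- ) -> str:
--     """Generate answer text from article content.
--
--     Single character-level pass: a small state machine recognises a '# '
--     heading at a line start and collects the title characters, instead of
--     splitting the content into a line list and scanning it.
--     States: 0 = at line start, 1 = inside a non-heading line,
--     2 = saw '#' at a line start, 3 = collecting the title.
--     """
--     state = 0
--     buf = []
--     for ch in article_content:
--         if state == 0:
--             if ch == '#':
--                 state = 2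
--             elif ch != '\n':
--                 state = 1
--         elif state == 1:
--             if ch == '\n':
--                 state = 0
--         elif state == 2:
--             if ch == ' ':
--                 state = 3
--             elif ch == '\n':
--                 state = 0
--             else:
--                 state = 1
--         else:  # state == 3: collecting title until end of line
--             if ch == '\n':
--                 break
--             buf.append(ch)
--     title = ''.join(buf).strip() if state == 3 else "this topic"
--     return f"Based on {title}: {excerpt}\n\nWould you like more details on this topic?"
-- ===== Notes on version B (the rewrite author's own statement) =====
-- stated objective: alternative
-- what changed: B replaces A's split-into-a-line-list-and-scan with a single character-level finite state machine: one pass over the characters tracks line-start/heading state and accumulates the title characters directly, never building a line list or doing substring tests.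
import Mathlib
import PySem

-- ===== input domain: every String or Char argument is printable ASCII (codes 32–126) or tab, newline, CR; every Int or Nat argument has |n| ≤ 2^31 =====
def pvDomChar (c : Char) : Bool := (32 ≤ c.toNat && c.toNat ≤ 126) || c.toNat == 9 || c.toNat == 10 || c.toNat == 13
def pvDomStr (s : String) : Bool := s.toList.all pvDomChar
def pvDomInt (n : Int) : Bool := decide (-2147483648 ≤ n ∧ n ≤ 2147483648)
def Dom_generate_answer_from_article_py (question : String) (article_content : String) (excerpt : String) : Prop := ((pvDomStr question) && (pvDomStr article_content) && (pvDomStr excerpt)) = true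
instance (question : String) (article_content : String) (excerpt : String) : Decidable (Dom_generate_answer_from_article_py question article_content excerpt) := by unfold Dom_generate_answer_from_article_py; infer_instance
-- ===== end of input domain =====

-- B replaces A's split-into-lines-and-scan with a single character-level state machine
-- (DFA) that recognises a '# ' heading at a line start and collects the title; alternative
-- decomposition, not claimed faster.


-- ===== PORT A =====
-- A's 'for line in lines: if line.startswith("# "): title = line[2:].strip(); break'
def pvTitleLoopA : List String → String → String
  | [], title => title
  | line :: rest, title =>
    if PySem.Str.startswith line "# " then PySem.Str.strip (PySem.Str.slice line (some 2) none)
    else pvTitleLoopA rest title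

def generate_answer_from_article_py (question : String) (article_content : String) (excerpt : String) : String :=
  let lines := (PySem.Str.split? article_content "\n").getD []   -- sep "\n" ≠ "", so split? is some
  let title := pvTitleLoopA lines "this topic"
  "Based on " ++ title ++ ": " ++ excerpt ++ "\n\nWould you like more details on this topic?"

-- ===== PORT B =====
-- B's 'for ch in article_content:' state machine, state/buf threaded through the recursion;
-- state 3 breaking on '\n' is returning the pair unchanged.
def pvSMloop : Nat → List Char → List Char → Nat × List Char
  | state, buf, [] => (state, buf)
  | state, buf, ch :: rest =>
    if state = 0 then
      if ch = '#' then pvSMloop 2 buf rest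
      else if ch ≠ '\n' then pvSMloop 1 buf rest
      else pvSMloop 0 buf rest
    else if state = 1 then
      if ch = '\n' then pvSMloop 0 buf rest else pvSMloop 1 buf rest
    else if state = 2 then
      if ch = ' ' then pvSMloop 3 buf rest
      else if ch = '\n' then pvSMloop 0 buf rest
      else pvSMloop 1 buf rest
    else  -- state == 3
      if ch = '\n' then (state, buf)
      else pvSMloop state (buf ++ [ch]) rest

def generate_answer_from_article_py_alt (question : String) (article_content : String) (excerpt : String) : String :=
  let r := pvSMloop 0 [] article_content.toList
  let title := if r.1 = 3 then PySem.Str.strip (String.ofList r.2) else "this topic"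
  "Based on " ++ title ++ ": " ++ excerpt ++ "\n\nWould you like more details on this topic?"

-- ===== PRECONDITION & SPEC =====
def Spec_generate_answer_from_article_py (question : String) (article_content : String) (excerpt : String) (out : String) : Prop := out = generate_answer_from_article_py_alt question article_content excerpt
instance (question : String) (article_content : String) (excerpt : String) (out : String) : Decidable (Spec_generate_answer_from_article_py question article_content excerpt out) := by unfold Spec_generate_answer_from_article_py; infer_instance

-- ===== CLAIM (what is proved, stated in full; the proofs are below) =====
def Claim_equal_generate_answer_from_article_py : Prop := ∀ (question : String) (article_content : String) (excerpt : String), Dom_generate_answer_from_article_py question article_content excerpt → Spec_generate_answer_from_article_py question article_content excerpt (generate_answer_from_article_py question article_content excerpt)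

-- ===== LEMMAS AND PROOFS =====

-- Proof-side reference: lines of cs split on '\n' (Python's cs.split('\n')).
def pvLines : List Char → List (List Char)
  | [] => [[]]
  | c :: rest =>
    if c = '\n' then [] :: pvLines rest
    else (c :: (pvLines rest).headI) :: (pvLines rest).tail

-- Proof-side reference: one character-level scan; the Bool says whether we stand at a line start.
def pvScan : Bool → List Char → List Char
  | _, [] => "this topic".toList
  | atStart, c :: rest =>
    if atStart ∧ ['#', ' '] <+: (c :: rest) then
      PySem.Chars.strip (List.takeWhile (· ≠ '\n') (rest.drop 1))
    else pvScan (c = '\n') rest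

-- Chars-level image of pvTitleLoopA under toList.
def pvTitleLoopC : List (List Char) → List Char → List Char
  | [], title => title
  | line :: rest, title =>
    if PySem.Chars.startswith line ['#', ' '] then PySem.Chars.strip (PySem.Chars.slice line (some 2) none)
    else pvTitleLoopC rest title

theorem pvLines_ne_nil (cs : List Char) : pvLines cs ≠ [] := by
  cases cs with
  | nil => simp [pvLines]
  | cons c rest => simp only [pvLines]; split <;> simp

theorem pvLines_headI (cs : List Char) : (pvLines cs).headI = cs.takeWhile (· ≠ '\n') := by
  induction cs with
  | nil => simp [pvLines]
  | cons c rest ih =>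
    simp only [pvLines]
    by_cases h : c = '\n'
    · simp [h]
    · simp [h, List.takeWhile_cons, ih]

theorem go_newline (fuel : Nat) (l : List Char) (hl : l.length < fuel) (cur : List Char) (acc : List (List Char)) :
    PySem.Chars.splitOn.go ['\n'] fuel l cur acc =
      acc.reverse ++ (cur.reverse ++ (pvLines l).headI) :: (pvLines l).tail := by
  induction fuel generalizing l cur acc with
  | zero => omega
  | succ fuel ih =>
    cases l with
    | nil => simp [PySem.Chars.splitOn.go, pvLines]
    | cons c rest =>
      simp only [PySem.Chars.splitOn.go]
      by_cases h : c = '\n'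
      · have hp : List.isPrefixOf ['\n'] (c :: rest) = true := by simp [h, List.isPrefixOf]
        rw [if_pos hp]
        have hdrop : List.drop (['\n'] : List Char).length (c :: rest) = rest := by simp
        rw [hdrop]
        simp only [List.length_cons] at hl
        rw [ih rest (by omega)]
        have hne := pvLines_ne_nil rest
        simp [pvLines, h, List.headI_cons]
        cases hrec : pvLines rest with
        | nil => exact absurd hrec hne
        | cons x xs => simp
      · have hp : List.isPrefixOf ['\n'] (c :: rest) = false := by
          simp [List.isPrefixOf]; intro hc; exact absurd hc.symm h
        rw [if_neg (by simp [hp])]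
        simp only [List.length_cons] at hl
        rw [ih rest (by omega)]
        simp [pvLines, h]

theorem splitOn_newline (cs : List Char) : PySem.Chars.splitOn cs ['\n'] = pvLines cs := by
  rw [PySem.Chars.splitOn, go_newline (cs.length + 1) cs (by omega)]
  have hne := pvLines_ne_nil cs
  cases hrec : pvLines cs with
  | nil => exact absurd hrec hne
  | cons x xs => simp

theorem space_prefix_takeWhile (rest : List Char) :
    ([' '] <+: rest.takeWhile (· ≠ '\n')) ↔ ([' '] <+: rest) := by
  cases rest with
  | nil => simp
  | cons r rs =>
    by_cases h : r = '\n'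
    · subst h
      simp [List.takeWhile_cons, List.cons_prefix_cons]
    · simp [List.takeWhile_cons, h, List.cons_prefix_cons]

theorem loopC_eq_scan (cs : List Char) :
    pvTitleLoopC (pvLines cs) "this topic".toList = pvScan true cs ∧
    pvTitleLoopC (pvLines cs).tail "this topic".toList = pvScan false cs := by
  induction cs with
  | nil => simp [pvLines, pvScan, pvTitleLoopC, PySem.Chars.startswith]
  | cons c rest ih =>
    obtain ⟨ih1, ih2⟩ := ih
    by_cases h : c = '\n'
    · subst h
      have hl : pvLines ('\n' :: rest) = [] :: pvLines rest := by simp [pvLines]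
      have hsw : PySem.Chars.startswith ([] : List Char) ['#', ' '] = false := by decide
      constructor
      · rw [hl, pvTitleLoopC, if_neg (by simp [hsw]), ih1]
        conv_rhs => rw [pvScan]
        rw [if_neg (by rintro ⟨-, hp⟩; simp [List.cons_prefix_cons] at hp)]
        simp
      · rw [hl, List.tail_cons, ih1]
        conv_rhs => rw [pvScan]
        rw [if_neg (by rintro ⟨hb, -⟩; exact Bool.false_ne_true hb)]
        simp
    · have hlines : pvLines (c :: rest) = (c :: (pvLines rest).headI) :: (pvLines rest).tail := by
        simp [pvLines, h]
      constructor
      · rw [hlines]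
        have hpref : PySem.Chars.startswith (c :: (pvLines rest).headI) ['#', ' '] = true ↔
            ['#', ' '] <+: (c :: rest) := by
          rw [PySem.Chars.startswith_iff, pvLines_headI, List.cons_prefix_cons,
            List.cons_prefix_cons]
          constructor
          · rintro ⟨hc, ht⟩
            exact ⟨hc, (space_prefix_takeWhile rest).mp ⟨ht.choose, ht.choose_spec⟩⟩
          · rintro ⟨hc, ht⟩
            exact ⟨hc, (space_prefix_takeWhile rest).mpr ⟨ht.choose, ht.choose_spec⟩⟩
        by_cases hm : ['#', ' '] <+: (c :: rest)
        · -- matching heading line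
          rw [pvTitleLoopC, if_pos (hpref.mpr hm)]
          conv_rhs => rw [pvScan]
          rw [if_pos ⟨rfl, hm⟩]
          obtain ⟨t, ht⟩ := hm
          rw [List.cons_prefix_cons] at *
          obtain ⟨hc, hsp⟩ : c = '#' ∧ [' '] <+: rest := by
            constructor
            · injection ht with h1 h2; exact h1.symm
            · injection ht with h1 h2; exact ⟨t, by simpa using h2⟩
          obtain ⟨xs, hxs⟩ := hsp
          subst hc
          rw [PySem.Chars.slice_eq_listSlice, PySem.List.slice_from _ (by norm_num)]
          rw [pvLines_headI, ← hxs]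
          simp [List.takeWhile_cons]
        · rw [pvTitleLoopC, if_neg (fun hsw => hm (hpref.mp hsw))]
          rw [ih2]
          conv_rhs => rw [pvScan]
          rw [if_neg (by rintro ⟨-, hp⟩; exact hm hp)]
          simp [h]
      · rw [hlines, List.tail_cons, ih2]
        conv_rhs => rw [pvScan]
        rw [if_neg (by rintro ⟨hb, -⟩; exact Bool.false_ne_true hb)]
        simp [h]

-- ===== A-side assembly =====
theorem loopA_toList (ls : List String) (d : String) :
    (pvTitleLoopA ls d).toList = pvTitleLoopC (ls.map String.toList) d.toList := by
  induction ls with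
  | nil => rfl
  | cons line rest ih =>
    rw [pvTitleLoopA, List.map_cons, pvTitleLoopC]
    have hsw : PySem.Str.startswith line "# " = PySem.Chars.startswith line.toList ['#', ' '] := by
      rw [PySem.Str.startswith_eq]; rfl
    by_cases h : PySem.Chars.startswith line.toList ['#', ' '] = true
    · rw [hsw.trans h, if_pos h]
      simp [h]
    · rw [if_neg h, hsw, if_neg h, ih]

theorem lines_map_toList (a : String) :
    ((PySem.Str.split? a "\n").getD []).map String.toList = pvLines a.toList := by
  have h := PySem.Str.split?_map a "\n"
  rw [show ("\n" : String).toList = ['\n'] from rfl] at h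
  rw [PySem.Chars.split?] at h
  simp only [List.isEmpty_cons, if_neg] at h
  cases hs : PySem.Str.split? a "\n" with
  | none => rw [hs] at h; simp at h
  | some ls =>
    rw [hs] at h
    simp only [Option.map_some, Option.getD_some] at h ⊢
    rw [show List.map String.toList ls = PySem.Chars.splitOn a.toList ['\n'] from by simpa using h,
      splitOn_newline]

theorem title_toList_A (a : String) :
    (pvTitleLoopA ((PySem.Str.split? a "\n").getD []) "this topic").toList = pvScan true a.toList := by
  rw [loopA_toList, lines_map_toList]
  exact (loopC_eq_scan a.toList).1

-- ===== B-side: the state machine computes pvScan =====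
-- Extract B's title (as chars) from a machine result.
def pvSMtitle (r : Nat × List Char) : List Char :=
  if r.1 = 3 then PySem.Chars.strip r.2 else "this topic".toList

theorem sm3_eq (cs buf : List Char) :
    pvSMloop 3 buf cs = (3, buf ++ cs.takeWhile (· ≠ '\n')) := by
  induction cs generalizing buf with
  | nil => simp [pvSMloop]
  | cons c rest ih =>
    by_cases h : c = '\n'
    · simp [pvSMloop, h]
    · simp [pvSMloop, h, List.takeWhile_cons, ih]

theorem sm_eq_scan (cs : List Char) :
    pvSMtitle (pvSMloop 0 [] cs) = pvScan true cs ∧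
    pvSMtitle (pvSMloop 1 [] cs) = pvScan false cs ∧
    pvSMtitle (pvSMloop 2 [] cs) =
      (if [' '] <+: cs then PySem.Chars.strip ((cs.drop 1).takeWhile (· ≠ '\n'))
       else pvScan false cs) := by
  induction cs with
  | nil =>
    refine ⟨rfl, rfl, ?_⟩
    rw [if_neg (by simp)]; rfl
  | cons c rest ih =>
    obtain ⟨ih0, ih1, ih2⟩ := ih
    have hscanF : pvScan false (c :: rest) = pvScan (c = '\n') rest := by
      rw [pvScan, if_neg (by rintro ⟨hb, -⟩; exact Bool.false_ne_true hb)]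
    refine ⟨?_, ?_, ?_⟩
    · -- state 0
      by_cases hh : c = '#'
      · subst hh
        rw [show pvSMloop 0 [] ('#' :: rest) = pvSMloop 2 [] rest from by simp [pvSMloop], ih2]
        conv_rhs => rw [pvScan]
        by_cases hm : ['#', ' '] <+: ('#' :: rest)
        · have hsp : [' '] <+: rest := by
            obtain ⟨-, hs⟩ := List.cons_prefix_cons.mp hm; exact hs
          rw [if_pos hsp, if_pos (show (true = true) ∧ ['#', ' '] <+: ('#' :: rest) from ⟨rfl, hm⟩)]
        · have hsp : ¬ [' '] <+: rest := fun hs => hm (List.cons_prefix_cons.mpr ⟨rfl, hs⟩)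
          rw [if_neg hsp, if_neg (show ¬ ((true = true) ∧ ['#', ' '] <+: ('#' :: rest)) from by
            rintro ⟨-, hp⟩; exact hm hp)]
          simp
      · by_cases hn : c = '\n'
        · subst hn
          rw [show pvSMloop 0 [] ('\n' :: rest) = pvSMloop 0 [] rest from by simp [pvSMloop], ih0]
          conv_rhs => rw [pvScan]
          rw [if_neg (by rintro ⟨-, hp⟩; simp [List.cons_prefix_cons] at hp)]
          simp
        · rw [show pvSMloop 0 [] (c :: rest) = pvSMloop 1 [] rest from by simp [pvSMloop, hh, hn], ih1]
          conv_rhs => rw [pvScan]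
          rw [if_neg (by rintro ⟨-, hp⟩; exact hh (List.cons_prefix_cons.mp hp).1.symm)]
          simp [hn]
    · -- state 1
      by_cases hn : c = '\n'
      · subst hn
        rw [show pvSMloop 1 [] ('\n' :: rest) = pvSMloop 0 [] rest from by simp [pvSMloop], ih0,
          hscanF]
        simp
      · rw [show pvSMloop 1 [] (c :: rest) = pvSMloop 1 [] rest from by simp [pvSMloop, hn], ih1,
          hscanF]
        simp [hn]
    · -- state 2
      by_cases hs : c = ' '
      · subst hs
        rw [show pvSMloop 2 [] (' ' :: rest) = pvSMloop 3 [] rest from by simp [pvSMloop],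
          sm3_eq, if_pos ⟨rest, rfl⟩]
        simp [pvSMtitle]
      · by_cases hn : c = '\n'
        · subst hn
          rw [show pvSMloop 2 [] ('\n' :: rest) = pvSMloop 0 [] rest from by simp [pvSMloop], ih0,
            if_neg (by simp [List.cons_prefix_cons]), hscanF]
          simp
        · rw [show pvSMloop 2 [] (c :: rest) = pvSMloop 1 [] rest from by simp [pvSMloop, hs, hn],
            ih1, if_neg (by simp [List.cons_prefix_cons]; intro h; exact hs h.symm), hscanF]
          simp [hn]

theorem title_toList_B (a : String) :
    ((if (pvSMloop 0 [] a.toList).1 = 3 then PySem.Str.strip (String.ofList (pvSMloop 0 [] a.toList).2)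
      else "this topic")).toList = pvScan true a.toList := by
  rw [← (sm_eq_scan a.toList).1, pvSMtitle]
  by_cases h : (pvSMloop 0 [] a.toList).1 = 3
  · rw [if_pos h, if_pos h, PySem.Str.toList_strip]
    simp
  · rw [if_neg h, if_neg h]

-- ===== VERDICT (by name: the statement is the Claim_ definition above) =====
theorem generate_answer_from_article_py_spec : Claim_equal_generate_answer_from_article_py := by
  intro q a e _
  unfold Spec_generate_answer_from_article_py generate_answer_from_article_py generate_answer_from_article_py_alt
  have htitle : pvTitleLoopA ((PySem.Str.split? a "\n").getD []) "this topic"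
      = (if (pvSMloop 0 [] a.toList).1 = 3 then PySem.Str.strip (String.ofList (pvSMloop 0 [] a.toList).2)
         else "this topic") :=
    String.toList_inj.mp ((title_toList_A a).trans (title_toList_B a).symm)
  simp only [htitle]
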